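-- pv_equiv track=rewrite | github.com/DemuirGos/Competitive-Programming | Solutions/Advent of Code/2020/day21.py | transformer
-- ===== SOURCE A (Python) =====
-- def transformer(r,d):
--     if len(d)==0:
--         return r
--     else:
--         i,v = d[0]
--         if i in r:
--             r[i] = r[i].intersection(v)
--             return transformer(r,d[1:])
--         else :
--             r[i] = v
--             return transformer(r,d[1:])
-- ===== SOURCE B (Python) =====
-- def transformer(r, d):
--     for i, v in d:
--         r[i] = r[i].intersection(v) if i in r else v
--     return r
-- ===== Notes on version B (the rewrite author's own statement) =====
-- stated objective: idiomatic
-- what changed: Replaces A's tail recursion with repeated list slicing d[1:] by a single plain for-loop over d with a conditional-expression body; no slices are ever built.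
import Mathlib
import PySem

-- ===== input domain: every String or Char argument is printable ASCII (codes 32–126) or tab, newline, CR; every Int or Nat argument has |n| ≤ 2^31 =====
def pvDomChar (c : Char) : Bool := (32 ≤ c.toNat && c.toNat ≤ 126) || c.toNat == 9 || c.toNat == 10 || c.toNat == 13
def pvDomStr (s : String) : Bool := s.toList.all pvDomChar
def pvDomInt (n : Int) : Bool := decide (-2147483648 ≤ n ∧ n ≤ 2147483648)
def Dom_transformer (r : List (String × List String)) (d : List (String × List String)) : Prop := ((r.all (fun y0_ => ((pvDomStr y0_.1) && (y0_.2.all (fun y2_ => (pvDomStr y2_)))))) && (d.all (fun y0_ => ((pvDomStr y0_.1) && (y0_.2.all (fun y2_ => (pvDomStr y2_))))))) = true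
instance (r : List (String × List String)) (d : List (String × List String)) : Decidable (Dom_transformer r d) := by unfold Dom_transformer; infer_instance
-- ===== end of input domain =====

-- B replaces A's recursion (with its d[1:] slice at every step) by a single for-loop over d;
-- A mutates r in place, the equivalence proved here is about the return value only.

-- ===== PORT A =====
-- recursion on d: len(d)==0 → return r; else split d[0], update the dict, recurse on d[1:]
def transformerA (r : PySem.Dict String (List String)) (d : List (String × List String)) :
    PySem.Dict String (List String) :=
  match d with
  | [] => r
  | (i, v) :: rest =>          -- i, v = d[0];  rest = d[1:]
    if r.contains i then
      transformerA (r.insert i (PySem.Set.inter (r.getD i []) v)) rest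
    else
      transformerA (r.insert i v) rest

def transformer (r : List (String × List String)) (d : List (String × List String)) : List (String × List String) :=
  (transformerA (PySem.Dict.mk r) d).items

-- ===== PORT B =====
-- for i, v in d: r[i] = r[i].intersection(v) if i in r else v
def transformer_alt (r : List (String × List String)) (d : List (String × List String)) : List (String × List String) :=
  (d.foldl (fun r p =>
      r.insert p.1 (if r.contains p.1 then PySem.Set.inter (r.getD p.1 []) p.2 else p.2))
    (PySem.Dict.mk r)).items

-- ===== PRECONDITION & SPEC =====
def Spec_transformer (r : List (String × List String)) (d : List (String × List String)) (out : List (String × List String)) : Prop := out = transformer_alt r d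
instance (r : List (String × List String)) (d : List (String × List String)) (out : List (String × List String)) : Decidable (Spec_transformer r d out) := by unfold Spec_transformer; infer_instance

-- ===== CLAIM (what is proved, stated in full; the proofs are below) =====
def Claim_equal_transformer : Prop := ∀ (r : List (String × List String)) (d : List (String × List String)), Dom_transformer r d → Spec_transformer r d (transformer r d)

-- ===== LEMMAS AND PROOFS =====
theorem transformerA_eq_foldl (d : List (String × List String))
    (r : PySem.Dict String (List String)) :
    transformerA r d =
      d.foldl (fun r p =>
        r.insert p.1 (if r.contains p.1 then PySem.Set.inter (r.getD p.1 []) p.2 else p.2)) r := by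
  induction d generalizing r with
  | nil => rfl
  | cons hd tl ih =>
    obtain ⟨i, v⟩ := hd
    simp only [transformerA, List.foldl_cons]
    by_cases h : r.contains i
    · simp [h, ih]
    · simp [h, ih]

-- ===== VERDICT (by name: the statement is the Claim_ definition above) =====
theorem transformer_spec : Claim_equal_transformer := by
  intro r d _
  show transformer r d = transformer_alt r d
  unfold transformer transformer_alt
  rw [transformerA_eq_foldl]
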